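-- pv_equiv track=rewrite | github.com/sdflksjf2683/MultimodalDialogue | generate_dialogue.py | process_relationship_text
-- ===== SOURCE A (Python) =====
-- def process_relationship_text(relationship_text):
--     # 한 번에 처리하는 함수
--     lines = relationship_text.split('\n')
--     result = []
--     current_item = ""
--
--     for line in lines:
--         if line.startswith('-') or line.startswith('<'):
--             # 이전 항목 저장 및 새로운 항목 시작
--             if current_item.strip():
--                 result.append(current_item.strip())
--             current_item = line
--         else:
--             # 현재 항목에 이어 붙이기
--             current_item += f" {line}"
--
--     # 마지막 항목 저장
--     if current_item.strip():
--         result.append(current_item.strip())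
--
--     # '-'가 포함된 항목만 필터링
--     return [item.strip() for item in result if '-' in item]
-- ===== SOURCE B (Python) =====
-- def process_relationship_text(relationship_text):
--     # Boundary-index decomposition: find header lines, slice into segments, join+strip, filter.
--     lines = relationship_text.split('\n')
--     bounds = [i for i, ln in enumerate(lines) if ln.startswith('-') or ln.startswith('<')]
--     cuts = [0] + bounds + [len(lines)]
--     items = [' '.join(lines[a:b]).strip() for a, b in zip(cuts, cuts[1:])]
--     return [it for it in items if '-' in it]
-- ===== Notes on version B (the rewrite author's own statement) =====
-- stated objective: alternative
-- what changed: Replaces A's single accumulating loop (current_item string built line by line with flush-on-header) by a two-pass boundary-index decomposition: first collect the indices of header lines ('-'/'<'), then slice the line list between consecutive boundaries and join/strip each segment.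
import Mathlib
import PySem

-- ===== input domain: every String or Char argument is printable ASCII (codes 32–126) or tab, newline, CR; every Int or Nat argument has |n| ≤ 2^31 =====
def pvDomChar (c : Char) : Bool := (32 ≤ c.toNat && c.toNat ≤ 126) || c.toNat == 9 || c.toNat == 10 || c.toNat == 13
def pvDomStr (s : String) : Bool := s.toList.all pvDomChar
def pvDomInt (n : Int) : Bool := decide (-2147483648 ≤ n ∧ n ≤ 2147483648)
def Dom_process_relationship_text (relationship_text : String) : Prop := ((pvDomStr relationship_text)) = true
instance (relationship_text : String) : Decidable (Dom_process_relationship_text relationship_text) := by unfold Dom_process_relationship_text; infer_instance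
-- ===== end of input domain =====

-- B replaces A's single accumulating loop by a two-pass boundary-index decomposition
-- (collect header-line indices, then slice/join/strip each segment); objective: alternative, same cost.

-- ===== PORT A =====
-- the header test 'line.startswith('-') or line.startswith('<')' (shared verbatim by both Pythons)
def pvIsB (l : List Char) : Bool :=
  PySem.Chars.startswith l ['-'] || PySem.Chars.startswith l ['<']

-- the body of A's for-loop over (result, current_item)
def pvStepA (st : List (List Char) × List Char) (line : List Char) :
    List (List Char) × List Char :=
  if pvIsB line then
    (if PySem.Chars.strip st.2 ≠ [] then st.1 ++ [PySem.Chars.strip st.2] else st.1, line)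
  else
    (st.1, st.2 ++ ' ' :: line)

def process_relationship_text (relationship_text : String) : List String :=
  let lines := PySem.Chars.splitOn relationship_text.toList ['\n']
  let st := lines.foldl pvStepA ([], [])
  let result :=
    if PySem.Chars.strip st.2 ≠ [] then st.1 ++ [PySem.Chars.strip st.2] else st.1
  (result.filter (fun item => PySem.Chars.isIn ['-'] item)).map
    (fun item => String.mk (PySem.Chars.strip item))

-- ===== PORT B =====
-- Source B's 'bounds' comprehension: indices of header lines
def pvBnds (ls : List (List Char)) (k : Int) : List Int :=
  ((PySem.List.enumerate ls k).filter (fun p => pvIsB p.2)).map (fun p => p.1)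

-- Source B's 'items' comprehension: join-and-strip each slice between consecutive cuts
def pvItems (full : List (List Char)) (cuts : List Int) : List (List Char) :=
  (cuts.zip cuts.tail).map
    (fun ab => PySem.Chars.strip (PySem.Chars.join [' '] (PySem.List.slice full (some ab.1) (some ab.2))))

def process_relationship_text_alt (relationship_text : String) : List String :=
  let lines := PySem.Chars.splitOn relationship_text.toList ['\n']
  let cuts := (0 : Int) :: pvBnds lines 0 ++ [(lines.length : Int)]
  let items := pvItems lines cuts
  (items.filter (fun it => PySem.Chars.isIn ['-'] it)).map String.mk

-- ===== PRECONDITION & SPEC =====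
def Spec_process_relationship_text (relationship_text : String) (out : List String) : Prop := out = process_relationship_text_alt relationship_text
instance (relationship_text : String) (out : List String) : Decidable (Spec_process_relationship_text relationship_text out) := by unfold Spec_process_relationship_text; infer_instance

-- ===== CLAIM (what is proved, stated in full; the proofs are below) =====
def Claim_equal_process_relationship_text : Prop := ∀ (relationship_text : String), Dom_process_relationship_text relationship_text → Spec_process_relationship_text relationship_text (process_relationship_text relationship_text)

-- ===== LEMMAS AND PROOFS =====

-- abstract item stream of A's loop: the stripped current item at each header line and at the end
def pvGo (cur : List Char) : List (List Char) → List (List Char)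
  | [] => [PySem.Chars.strip cur]
  | l :: ls =>
    if pvIsB l then PySem.Chars.strip cur :: pvGo l ls
    else pvGo (cur ++ ' ' :: l) ls

-- abstract item stream of B's slicing: the current segment's lines, joined and stripped
def pvSl (cur : List (List Char)) : List (List Char) → List (List Char)
  | [] => [PySem.Chars.strip (PySem.Chars.join [' '] cur)]
  | l :: ls =>
    if pvIsB l then
      PySem.Chars.strip (PySem.Chars.join [' '] cur) :: pvSl [l] ls
    else pvSl (cur ++ [l]) ls

lemma pvDropWhile_idem {α : Type} (p : α → Bool) (l : List α) :
    (l.dropWhile p).dropWhile p = l.dropWhile p := by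
  induction l with
  | nil => rfl
  | cons a l ih =>
    by_cases h : p a = true
    · simpa [h] using ih
    · simp [h]

lemma pvDropWhile_prefix {α : Type} (p : α → Bool) (s t : List α)
    (ht : t.dropWhile p = t) (hp : s <+: t) : s.dropWhile p = s := by
  cases s with
  | nil => rfl
  | cons a s' =>
    cases t with
    | nil => simp at hp
    | cons b t' =>
      have hab : a = b := by
        obtain ⟨u, hu⟩ := hp
        simpa using (congrArg (·.head?) hu : _)
      have hpb : p b = false := by
        by_contra h
        have hb : p b = true := by simpa using h
        have := ht
        rw [List.dropWhile_cons, if_pos hb] at this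
        have hlen := congrArg List.length this
        have := List.length_dropWhile_le p t'
        simp at hlen; omega
      rw [List.dropWhile_cons, hab, hpb]
      simp

lemma pvRstrip_prefix (t : List Char) : PySem.Chars.rstrip t <+: t := by
  unfold PySem.Chars.rstrip
  have h := (List.dropWhile_suffix (l := t.reverse) PySem.Chars.isspace).reverse
  simpa using h

lemma pvLstrip_lstrip (s : List Char) :
    PySem.Chars.lstrip (PySem.Chars.lstrip s) = PySem.Chars.lstrip s := by
  unfold PySem.Chars.lstrip
  exact pvDropWhile_idem _ _

lemma pvRstrip_rstrip (t : List Char) :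
    PySem.Chars.rstrip (PySem.Chars.rstrip t) = PySem.Chars.rstrip t := by
  unfold PySem.Chars.rstrip
  rw [List.reverse_reverse, pvDropWhile_idem]

lemma pvLstrip_rstrip (t : List Char) (ht : PySem.Chars.lstrip t = t) :
    PySem.Chars.lstrip (PySem.Chars.rstrip t) = PySem.Chars.rstrip t := by
  unfold PySem.Chars.lstrip at *
  exact pvDropWhile_prefix _ _ t ht (pvRstrip_prefix t)

lemma pvStrip_strip (s : List Char) :
    PySem.Chars.strip (PySem.Chars.strip s) = PySem.Chars.strip s := by
  unfold PySem.Chars.strip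
  rw [pvLstrip_rstrip (PySem.Chars.lstrip s) (pvLstrip_lstrip s), pvRstrip_rstrip]

lemma pvStrip_cons_space (x : List Char) :
    PySem.Chars.strip (' ' :: x) = PySem.Chars.strip x := by
  unfold PySem.Chars.strip PySem.Chars.lstrip
  rw [List.dropWhile_cons]
  have : PySem.Chars.isspace ' ' = true := by decide
  rw [this]
  simp

lemma pvJoin_append (cur : List (List Char)) (l : List Char) (h : cur ≠ []) :
    PySem.Chars.join [' '] (cur ++ [l]) = PySem.Chars.join [' '] cur ++ ' ' :: l := by
  induction cur with
  | nil => exact absurd rfl h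
  | cons a cur ih =>
    cases cur with
    | nil => simp [PySem.Chars.join, List.intercalate]
    | cons b cur =>
      rw [List.cons_append, List.cons_append, PySem.Chars.join_cons_cons,
        ← List.cons_append, ih (by simp), PySem.Chars.join_cons_cons]
      simp

-- A's loop equals the abstract stream, filtered to the non-empty items
lemma pvA_loop (ls : List (List Char)) (res : List (List Char)) (cur : List Char) :
    (let st := ls.foldl pvStepA (res, cur)
     if PySem.Chars.strip st.2 ≠ [] then st.1 ++ [PySem.Chars.strip st.2] else st.1)
      = res ++ (pvGo cur ls).filter (fun x => decide (x ≠ [])) := by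
  induction ls generalizing res cur with
  | nil =>
    simp only [List.foldl_nil, pvGo, List.filter]
    split_ifs with h <;> simp_all
  | cons l ls ih =>
    by_cases hb : pvIsB l
    · simp only [List.foldl_cons, pvStepA, hb, if_true, pvGo]
      rw [ih]
      simp only [List.filter_cons]
      split_ifs with h <;> simp_all
    · simp only [List.foldl_cons, pvStepA, hb, if_false, ite_false, pvGo,
        Bool.false_eq_true]
      exact ih res (cur ++ ' ' :: l)

-- B's slice items equal the abstract stream
lemma pvBnds_cons (l : List Char) (ls : List (List Char)) (k : Int) :
    pvBnds (l :: ls) k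
      = if pvIsB l then k :: pvBnds ls (k + 1) else pvBnds ls (k + 1) := by
  simp only [pvBnds, PySem.List.enumerate_cons, List.filter_cons]
  split_ifs with h <;> simp_all

lemma pvItems_cons₂ (full : List (List Char)) (a b : Int) (rest : List Int) :
    pvItems full (a :: b :: rest)
      = PySem.Chars.strip (PySem.Chars.join [' '] (PySem.List.slice full (some a) (some b)))
        :: pvItems full (b :: rest) := by
  simp [pvItems]

lemma pvB_items (ls full : List (List Char)) (c p : Nat) (hcp : c ≤ p)
    (hd : full.drop p = ls) :
    pvItems full ((c : Int) :: pvBnds ls (p : Int) ++ [(full.length : Int)])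
      = pvSl ((full.drop c).take (p - c)) ls := by
  induction ls generalizing c p with
  | nil =>
    have hlen : full.length ≤ p := by
      have := congrArg List.length hd
      simp only [List.length_drop, List.length_nil] at this
      omega
    have hbn : pvBnds [] (p : Int) = [] := by
      simp [pvBnds, PySem.List.enumerate]
    rw [hbn]
    simp only [List.cons_append, List.nil_append]
    rw [pvItems_cons₂, PySem.List.slice_natCast]
    have h1 : pvItems full [((full.length : Nat) : Int)] = [] := by simp [pvItems]
    have h2 : (full.drop c).take (full.length - c) = full.drop c :=
      List.take_of_length_le (by simp)
    have h3 : (full.drop c).take (p - c) = full.drop c :=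
      List.take_of_length_le (by simp; omega)
    rw [h1, h2, h3]
    simp [pvSl]
  | cons l ls ihl =>
    have hp : p < full.length := by
      have := congrArg List.length hd
      simp only [List.length_drop, List.length_cons] at this
      omega
    have hd' : full.drop (p + 1) = ls := by
      have h := List.drop_drop (l := full) (i := 1) (j := p)
      rw [← h, hd]
      rfl
    have hget : full[p]? = some l := by
      have h := List.getElem?_drop (xs := full) (i := p) (j := 0)
      rw [hd] at h
      simpa using h.symm
    have hcast : ((p : Int) + 1) = (((p + 1 : Nat)) : Int) := by push_cast; ring
    rw [pvBnds_cons, hcast]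
    by_cases hb : pvIsB l
    · rw [if_pos hb]
      simp only [List.cons_append]
      have hih := ihl p (p + 1) (by omega) hd'
      simp only [List.cons_append] at hih
      rw [pvItems_cons₂ full (c : Int) (p : Int), PySem.List.slice_natCast, hih]
      have hseg : (full.drop p).take (p + 1 - p) = [l] := by
        have : p + 1 - p = 1 := by omega
        rw [this, hd]
        rfl
      rw [hseg]
      simp [pvSl, hb]
    · rw [if_neg (by simp [hb])]
      have hih := ihl c (p + 1) (by omega) hd'
      simp only [List.cons_append] at hih ⊢
      rw [hih]
      have hseg : (full.drop c).take (p + 1 - c)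
          = (full.drop c).take (p - c) ++ [l] := by
        have h1 : p + 1 - c = (p - c) + 1 := by omega
        rw [h1, List.take_succ, List.getElem?_drop]
        have h2 : c + (p - c) = p := by omega
        rw [h2, hget]
        rfl
      rw [hseg]
      simp [pvSl, hb]

-- the two abstract streams coincide
lemma pvJoin_singleton (l : List Char) : PySem.Chars.join [' '] [l] = l := by
  simp [PySem.Chars.join, List.intercalate]

lemma pvStrip_inv (c : List Char) (cur : List (List Char))
    (h : c = PySem.Chars.join [' '] cur ∨
         (cur ≠ [] ∧ c = ' ' :: PySem.Chars.join [' '] cur)) :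
    PySem.Chars.strip c = PySem.Chars.strip (PySem.Chars.join [' '] cur) := by
  rcases h with h | ⟨-, h⟩
  · rw [h]
  · rw [h, pvStrip_cons_space]

lemma pvGo_eq_pvSl (ls : List (List Char)) (c : List Char) (cur : List (List Char))
    (h : c = PySem.Chars.join [' '] cur ∨
         (cur ≠ [] ∧ c = ' ' :: PySem.Chars.join [' '] cur)) :
    pvGo c ls = pvSl cur ls := by
  induction ls generalizing c cur with
  | nil => simp only [pvGo, pvSl, pvStrip_inv c cur h]
  | cons l ls ih =>
    simp only [pvGo, pvSl]
    by_cases hb : pvIsB l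
    · simp only [hb, if_true, pvStrip_inv c cur h]
      rw [ih l [l] (Or.inl (pvJoin_singleton l).symm)]
    · simp only [hb, Bool.false_eq_true, if_false]
      apply ih
      rcases h with h | ⟨hne, h⟩
      · cases cur with
        | nil =>
          right
          refine ⟨by simp, ?_⟩
          simp [h, PySem.Chars.join_nil]
        | cons a cs =>
          left
          rw [h, pvJoin_append _ _ (by simp)]
      · right
        refine ⟨by simp, ?_⟩
        rw [h, pvJoin_append _ _ hne]
        rfl

lemma pvGo_stripped (c : List Char) (ls : List (List Char)) (x : List Char)
    (hx : x ∈ pvGo c ls) : PySem.Chars.strip x = x := by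
  induction ls generalizing c with
  | nil =>
    simp only [pvGo, List.mem_singleton] at hx
    rw [hx, pvStrip_strip]
  | cons l ls ih =>
    simp only [pvGo] at hx
    by_cases hb : pvIsB l
    · simp only [hb, if_true, List.mem_cons] at hx
      rcases hx with hx | hx
      · rw [hx, pvStrip_strip]
      · exact ih l hx
    · simp only [hb, Bool.false_eq_true, if_false] at hx
      exact ih _ hx

-- ===== VERDICT (by name: the statement is the Claim_ definition above) =====
lemma pvIsIn_nil_dash : PySem.Chars.isIn ['-'] [] = false := by decide

theorem process_relationship_text_spec : Claim_equal_process_relationship_text := by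
  intro t _
  unfold Spec_process_relationship_text process_relationship_text process_relationship_text_alt
  simp only []
  set lines := PySem.Chars.splitOn t.toList ['\n'] with hlines
  -- A side
  have hA := pvA_loop lines [] []
  simp only [List.nil_append] at hA
  rw [hA]
  -- B side
  have hB := pvB_items lines lines 0 0 (le_refl 0) (by simp)
  simp only [Nat.cast_zero, Nat.sub_zero, List.drop_zero, List.take_zero] at hB
  rw [hB]
  -- bridge
  have hGS : pvGo [] lines = pvSl [] lines :=
    pvGo_eq_pvSl lines [] [] (Or.inl (by rw [PySem.Chars.join_nil]))
  rw [← hGS]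
  set X := pvGo [] lines with hX
  -- collapse the two filters
  rw [List.filter_filter]
  have hfe : (fun x => PySem.Chars.isIn ['-'] x && decide (x ≠ [])) =
      (fun x => PySem.Chars.isIn ['-'] x) := by
    funext x
    cases hx : x with
    | nil => simp [pvIsIn_nil_dash]
    | cons a y => simp
  rw [hfe]
  -- items are already stripped, so the final strip is the identity
  apply List.map_congr_left
  intro x hx
  have hmem : x ∈ X := (List.mem_filter.mp hx).1
  rw [pvGo_stripped [] lines x hmem]
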